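-- pv_equiv track=rewrite | github.com/mitchhit234/MarchMadness | main.py | sort_games
-- ===== SOURCE A (Python) =====
-- def sort_games(raw_games):
--   # Dividing our data into seperate arrays for each
--   # Region and Final Four
--   rounds = [[] for _ in range(5)]
--   counter = 0
--   for i in range(len(raw_games)-3):
--     cur_bound = 15*counter
--     if i < 8+cur_bound:
--       rounds[4].append(raw_games[i])
--     elif i < 12+cur_bound:
--       rounds[3].append(raw_games[i])
--     elif i < 14+cur_bound:
--       rounds[2].append(raw_games[i])
--     else:
--       counter += 1
--       rounds[1].append(raw_games[i])
--
--   # Add the Final Four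
--   for i in range(len(raw_games)-1,len(raw_games)-4,-1):
--     rounds[0].append(raw_games[i])
--
--   # Create a new array with our
--   # games sorted as a binary tree
--   games = []
--   for rd in rounds:
--     for game in rd:
--       games.append(game)
--
--   return games
-- ===== SOURCE B (Python) =====
-- def sort_games(raw_games):
--   # Block decomposition: each region is a 15-game block split by slices,
--   # then the final four are taken by index from the end.
--   n = len(raw_games)
--   m = n - 3
--   r4, r3, r2, r1 = [], [], [], []
--   for base in range(0, max(m, 0), 15):
--     e = min(base + 15, m)
--     r4 += raw_games[base:min(base + 8, e)]
--     r3 += raw_games[min(base + 8, e):min(base + 12, e)]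
--     r2 += raw_games[min(base + 12, e):min(base + 14, e)]
--     if base + 14 < m:
--       r1.append(raw_games[base + 14])
--   final = [raw_games[n - 1], raw_games[n - 2], raw_games[n - 3]]
--   return final + r1 + r2 + r3 + r4
-- ===== Notes on version B (the rewrite author's own statement) =====
-- stated objective: alternative
-- what changed: Replaces A's flat per-index loop with a running region counter and per-element branch tests by a loop over 15-game region blocks that fills the round buckets with bulk slices, plus a direct 3-element final-four list.
import Mathlib
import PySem

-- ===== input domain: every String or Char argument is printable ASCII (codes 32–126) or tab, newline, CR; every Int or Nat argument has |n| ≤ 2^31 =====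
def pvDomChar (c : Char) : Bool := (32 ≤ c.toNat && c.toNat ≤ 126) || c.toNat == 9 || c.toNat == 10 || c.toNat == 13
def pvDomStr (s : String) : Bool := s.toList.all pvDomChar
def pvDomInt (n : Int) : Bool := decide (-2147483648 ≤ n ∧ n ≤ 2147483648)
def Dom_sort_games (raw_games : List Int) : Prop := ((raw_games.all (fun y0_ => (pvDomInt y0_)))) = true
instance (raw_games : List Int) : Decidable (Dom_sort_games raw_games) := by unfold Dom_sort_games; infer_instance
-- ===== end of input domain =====

-- B replaces A's flat per-index loop with its running counter by a loop over 15-game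
-- region blocks filled by bulk slices (different decomposition, same cost).

-- ===== PORT A =====
-- loop body of A's first for-loop: state = (counter, rounds4, rounds3, rounds2, rounds1)
def sortAStep (g : List Int) (st : Int × List Int × List Int × List Int × List Int)
    (i : Int) : Int × List Int × List Int × List Int × List Int :=
  let (counter, r4, r3, r2, r1) := st
  let cur := 15 * counter
  if i < 8 + cur then (counter, r4 ++ [PySem.List.pyGetD g i 0], r3, r2, r1)
  else if i < 12 + cur then (counter, r4, r3 ++ [PySem.List.pyGetD g i 0], r2, r1)
  else if i < 14 + cur then (counter, r4, r3, r2 ++ [PySem.List.pyGetD g i 0], r1)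
  else (counter + 1, r4, r3, r2, r1 ++ [PySem.List.pyGetD g i 0])

def sort_games (raw_games : List Int) : List Int :=
  let n : Int := raw_games.length
  let st := (PySem.List.pyRange 0 (n - 3) 1).foldl (sortAStep raw_games)
      (0, [], [], [], [])
  let r0 := (PySem.List.pyRange (n - 1) (n - 4) (-1)).foldl
      (fun acc i => acc ++ [PySem.List.pyGetD raw_games i 0]) []
  r0 ++ st.2.2.2.2 ++ st.2.2.2.1 ++ st.2.2.1 ++ st.2.1

-- ===== PORT B =====
-- loop body of B's block loop: state = (rounds4, rounds3, rounds2, rounds1)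
def sortBStep (g : List Int) (m : Int) (st : List Int × List Int × List Int × List Int)
    (base : Int) : List Int × List Int × List Int × List Int :=
  let (r4, r3, r2, r1) := st
  let e := min (base + 15) m
  (r4 ++ PySem.List.slice g (some base) (some (min (base + 8) e)),
   r3 ++ PySem.List.slice g (some (min (base + 8) e)) (some (min (base + 12) e)),
   r2 ++ PySem.List.slice g (some (min (base + 12) e)) (some (min (base + 14) e)),
   if base + 14 < m then r1 ++ [PySem.List.pyGetD g (base + 14) 0] else r1)

def sort_games_alt (raw_games : List Int) : List Int :=
  let n : Int := raw_games.length
  let m := n - 3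
  let st := (PySem.List.pyRange 0 (max m 0) 15).foldl (sortBStep raw_games m)
      ([], [], [], [])
  let fin := [PySem.List.pyGetD raw_games (n - 1) 0, PySem.List.pyGetD raw_games (n - 2) 0,
              PySem.List.pyGetD raw_games (n - 3) 0]
  fin ++ st.2.2.2 ++ st.2.2.1 ++ st.2.1 ++ st.1

-- ===== PRECONDITION & SPEC =====
-- Pre_ excludes lists of length 0 or 1, on which the Python A raises IndexError
-- in its final-four loop (B's Python raises there too).
def Pre_sort_games (raw_games : List Int) : Prop := 2 ≤ raw_games.length
instance (raw_games : List Int) : Decidable (Pre_sort_games raw_games) := by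
  unfold Pre_sort_games; infer_instance

def pvWitness_sort_games : List Int := [1, 2, 3, 4, 5]

def Spec_sort_games (raw_games : List Int) (out : List Int) : Prop := out = sort_games_alt raw_games
instance (raw_games : List Int) (out : List Int) : Decidable (Spec_sort_games raw_games out) := by unfold Spec_sort_games; infer_instance

-- ===== CLAIM (what is proved, stated in full; the proofs are below) =====
def Claim_equal_sort_games : Prop := ∀ (raw_games : List Int), Dom_sort_games raw_games → Pre_sort_games raw_games → Spec_sort_games raw_games (sort_games raw_games)

-- ===== LEMMAS AND PROOFS =====

-- a range with step 15 peels its head like a range with step 1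
theorem pyRange15_cons (a b : Int) (h : a < b) :
    PySem.List.pyRange a b 15 = a :: PySem.List.pyRange (a + 15) b 15 := by
  rw [PySem.List.pyRange_of_pos _ _ (by norm_num : (0:Int) < 15),
      PySem.List.pyRange_of_pos _ _ (by norm_num : (0:Int) < 15)]
  rw [if_pos h]
  by_cases h2 : a + 15 < b
  · rw [if_pos h2]
    have hN : ((b - a + 15 - 1) / 15).toNat = ((b - (a+15) + 15 - 1) / 15).toNat + 1 := by omega
    rw [hN, List.range_succ_eq_map, List.map_cons, List.map_map]
    refine congrArg₂ _ (by ring) (List.map_congr_left fun k _ => ?_)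
    simp only [Function.comp_apply]
    push_cast
    ring
  · rw [if_neg h2]
    have hN : ((b - a + 15 - 1) / 15).toNat = 1 := by omega
    rw [hN]
    simp

theorem pyRange15_nil (a b : Int) (h : b ≤ a) :
    PySem.List.pyRange a b 15 = [] := by
  rw [PySem.List.pyRange_of_pos _ _ (by norm_num : (0:Int) < 15)]
  simp [if_neg (by omega : ¬ a < b)]

theorem pyRange_one_nil (a b : Int) (h : b ≤ a) :
    PySem.List.pyRange a b 1 = [] := by
  rw [PySem.List.pyRange_one, (by omega : (b - a).toNat = 0)]
  simp

-- a slice with in-range bounds is the map of element access over the index range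
theorem slice_eq_map_pyRange (g : List Int) (a b : Int) (ha : 0 ≤ a) (hab : a ≤ b)
    (hb : b ≤ g.length) :
    PySem.List.slice g (some a) (some b)
      = (PySem.List.pyRange a b 1).map (fun i => PySem.List.pyGetD g i 0) := by
  rw [PySem.List.slice_toNat g ha (by omega)]
  apply List.ext_getElem
  · simp [PySem.List.length_pyRange_one]
    omega
  · intro k h1 h2
    simp only [List.getElem_take, List.getElem_drop, List.getElem_map,
      PySem.List.getElem_pyRange_one]
    rw [PySem.List.pyGetD_eq_getElem g 0 (by omega)]
    · congr 1
      omega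
    · simp [PySem.List.length_pyRange_one] at h2
      omega

-- folding A's step over a segment entirely inside one branch
theorem foldA_branch4 (g : List Int) (c : Int) (r4 r3 r2 r1 : List Int) (l : List Int)
    (h : ∀ i ∈ l, i < 8 + 15 * c) :
    l.foldl (sortAStep g) (c, r4, r3, r2, r1)
      = (c, r4 ++ l.map (fun i => PySem.List.pyGetD g i 0), r3, r2, r1) := by
  induction l generalizing r4 with
  | nil => simp
  | cons x xs ih =>
    have hx := h x (by simp)
    simp only [List.foldl_cons, sortAStep, if_pos (by omega : x < 8 + 15 * c)]
    rw [ih _ (fun i hi => h i (by simp [hi]))]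
    simp

theorem foldA_branch3 (g : List Int) (c : Int) (r4 r3 r2 r1 : List Int) (l : List Int)
    (h : ∀ i ∈ l, 8 + 15 * c ≤ i ∧ i < 12 + 15 * c) :
    l.foldl (sortAStep g) (c, r4, r3, r2, r1)
      = (c, r4, r3 ++ l.map (fun i => PySem.List.pyGetD g i 0), r2, r1) := by
  induction l generalizing r3 with
  | nil => simp
  | cons x xs ih =>
    have hx := h x (by simp)
    simp only [List.foldl_cons, sortAStep, if_neg (by omega : ¬ x < 8 + 15 * c),
      if_pos (by omega : x < 12 + 15 * c)]
    rw [ih _ (fun i hi => h i (by simp [hi]))]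
    simp

theorem foldA_branch2 (g : List Int) (c : Int) (r4 r3 r2 r1 : List Int) (l : List Int)
    (h : ∀ i ∈ l, 12 + 15 * c ≤ i ∧ i < 14 + 15 * c) :
    l.foldl (sortAStep g) (c, r4, r3, r2, r1)
      = (c, r4, r3, r2 ++ l.map (fun i => PySem.List.pyGetD g i 0), r1) := by
  induction l generalizing r2 with
  | nil => simp
  | cons x xs ih =>
    have hx := h x (by simp)
    simp only [List.foldl_cons, sortAStep, if_neg (by omega : ¬ x < 8 + 15 * c),
      if_neg (by omega : ¬ x < 12 + 15 * c), if_pos (by omega : x < 14 + 15 * c)]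
    rw [ih _ (fun i hi => h i (by simp [hi]))]
    simp

-- one full (possibly truncated) region block of A
theorem foldA_block (g : List Int) (m c : Int) (r4 r3 r2 r1 : List Int)
    (hbm : 15 * c < m) :
    (PySem.List.pyRange (15 * c) (min (15 * c + 15) m) 1).foldl (sortAStep g)
        (c, r4, r3, r2, r1)
      = (if 15 * c + 14 < m then c + 1 else c,
         r4 ++ (PySem.List.pyRange (15 * c) (min (15 * c + 8) (min (15 * c + 15) m)) 1).map
            (fun i => PySem.List.pyGetD g i 0),
         r3 ++ (PySem.List.pyRange (min (15 * c + 8) (min (15 * c + 15) m))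
                 (min (15 * c + 12) (min (15 * c + 15) m)) 1).map
            (fun i => PySem.List.pyGetD g i 0),
         r2 ++ (PySem.List.pyRange (min (15 * c + 12) (min (15 * c + 15) m))
                 (min (15 * c + 14) (min (15 * c + 15) m)) 1).map
            (fun i => PySem.List.pyGetD g i 0),
         if 15 * c + 14 < m then r1 ++ [PySem.List.pyGetD g (15 * c + 14) 0] else r1) := by
  set e := min (15 * c + 15) m with he
  set m1 := min (15 * c + 8) e with hm1
  set m2 := min (15 * c + 12) e with hm2
  set m3 := min (15 * c + 14) e with hm3
  have h1 : (15 * c : Int) ≤ m1 := by omega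
  have h2 : m1 ≤ m2 := by omega
  have h3 : m2 ≤ m3 := by omega
  have h4 : m3 ≤ e := by omega
  rw [PySem.List.pyRange_one_append (15 * c) m1 e h1 (by omega),
      PySem.List.pyRange_one_append m1 m2 e h2 (by omega),
      PySem.List.pyRange_one_append m2 m3 e h3 h4,
      List.foldl_append, List.foldl_append, List.foldl_append]
  rw [foldA_branch4 g c r4 r3 r2 r1 _
        (fun i hi => by rw [PySem.List.mem_pyRange_one] at hi; omega),
      foldA_branch3 g c _ r3 r2 r1 _
        (fun i hi => by rw [PySem.List.mem_pyRange_one] at hi; omega),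
      foldA_branch2 g c _ _ r2 r1 _
        (fun i hi => by rw [PySem.List.mem_pyRange_one] at hi; omega)]
  by_cases hL : 15 * c + 14 < m
  · have he15 : e = 15 * c + 15 := by omega
    have hm314 : m3 = 15 * c + 14 := by omega
    have hseg : PySem.List.pyRange (15 * c + 14) (15 * c + 15) 1 = [15 * c + 14] := by
      rw [PySem.List.pyRange_one, (by omega : (15 * c + 15 - (15 * c + 14)).toNat = 1)]
      simp
    rw [hm314, he15, hseg]
    simp only [List.foldl_cons, List.foldl_nil, sortAStep,
      if_neg (by omega : ¬ (15 * c + 14 : Int) < 8 + 15 * c),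
      if_neg (by omega : ¬ (15 * c + 14 : Int) < 12 + 15 * c),
      if_neg (by omega : ¬ (15 * c + 14 : Int) < 14 + 15 * c), if_pos hL]
  · have hm3e : m3 = e := by omega
    rw [hm3e, (by rw [PySem.List.pyRange_one]; simp :
          PySem.List.pyRange e e 1 = []), if_neg hL, if_neg hL]
    simp

-- the main loop of A (ignoring the counter) equals the block loop of B
theorem foldAB (g : List Int) (m : Int) (hm : m ≤ (g.length : Int)) :
    ∀ (d : Nat) (c : Int), 0 ≤ c → (m - 15 * c).toNat ≤ d →
    ∀ (r4 r3 r2 r1 : List Int),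
    ((PySem.List.pyRange (15 * c) m 1).foldl (sortAStep g) (c, r4, r3, r2, r1)).2
      = (PySem.List.pyRange (15 * c) (max m 0) 15).foldl (sortBStep g m) (r4, r3, r2, r1) := by
  intro d
  induction d with
  | zero =>
    intro c hc hd r4 r3 r2 r1
    rw [pyRange_one_nil _ _ (by omega), pyRange15_nil _ _ (by omega)]
    rfl
  | succ d ih =>
    intro c hc hd r4 r3 r2 r1
    by_cases hend : m ≤ 15 * c
    · rw [pyRange_one_nil _ _ (by omega), pyRange15_nil _ _ (by omega)]
      rfl
    · have hend' : 15 * c < m := by omega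
      have hB : sortBStep g m (r4, r3, r2, r1) (15 * c)
          = (r4 ++ (PySem.List.pyRange (15 * c) (min (15 * c + 8) (min (15 * c + 15) m)) 1).map
               (fun i => PySem.List.pyGetD g i 0),
             r3 ++ (PySem.List.pyRange (min (15 * c + 8) (min (15 * c + 15) m))
                     (min (15 * c + 12) (min (15 * c + 15) m)) 1).map
               (fun i => PySem.List.pyGetD g i 0),
             r2 ++ (PySem.List.pyRange (min (15 * c + 12) (min (15 * c + 15) m))
                     (min (15 * c + 14) (min (15 * c + 15) m)) 1).map
               (fun i => PySem.List.pyGetD g i 0),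
             if 15 * c + 14 < m then r1 ++ [PySem.List.pyGetD g (15 * c + 14) 0] else r1) := by
        simp only [sortBStep]
        rw [slice_eq_map_pyRange g _ _ (by omega) (by omega) (by omega),
            slice_eq_map_pyRange g _ _ (by omega) (by omega) (by omega),
            slice_eq_map_pyRange g _ _ (by omega) (by omega) (by omega)]
      rw [PySem.List.pyRange_one_append (15 * c) (min (15 * c + 15) m) m (by omega) (by omega),
          List.foldl_append,
          foldA_block g m c r4 r3 r2 r1 hend',
          pyRange15_cons (15 * c) (max m 0) (by omega),
          List.foldl_cons, hB]
      by_cases hL : 15 * c + 14 < m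
      · rw [if_pos hL, if_pos hL]
        have h15 : min (15 * c + 15) m = 15 * (c + 1) := by omega
        have h15' : (15 * c + 15 : Int) = 15 * (c + 1) := by ring
        rw [h15, h15']
        exact ih (c + 1) (by omega) (by omega) _ _ _ _
      · rw [if_neg hL, if_neg hL]
        have hmin : min (15 * c + 15) m = m := by omega
        rw [hmin, pyRange_one_nil m m (by omega),
            pyRange15_nil (15 * c + 15) (max m 0) (by omega)]
        rfl

-- the final-four index range
theorem pyRange_down3 (a : Int) :
    PySem.List.pyRange a (a - 3) (-1) = [a, a - 1, a - 2] := by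
  simp only [PySem.List.pyRange]
  norm_num
  rw [(by decide : Int.toNat 3 = 3)]
  simp [List.range_succ]
  constructor <;> ring

-- ===== VERDICT (by name: the statement is the Claim_ definition above) =====
theorem sort_games_spec : Claim_equal_sort_games := by
  intro g _hDom _hPre
  unfold Spec_sort_games
  simp only [sort_games, sort_games_alt]
  have hd3 : ((g.length : Int) - 4) = ((g.length : Int) - 1) - 3 := by ring
  rw [hd3, pyRange_down3]
  have hAB := foldAB g ((g.length : Int) - 3) (by omega)
      ((g.length : Int) - 3).toNat 0 (by omega) (by omega) [] [] [] []
  rw [(by norm_num : (15 * (0:Int)) = 0)] at hAB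
  simp only [List.foldl_cons, List.foldl_nil, List.nil_append]
  rw [← hAB,
      (by ring : ((g.length : Int) - 1) - 1 = (g.length : Int) - 2),
      (by ring : ((g.length : Int) - 1) - 2 = (g.length : Int) - 3)]
  simp
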